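-- pv_equiv track=rewrite | github.com/phamngocson1408/parity_generator | Parity_generator/declare_port.py | find_last_valid_index
-- ===== SOURCE A (Python) =====
-- def find_last_valid_index(port_declaration: str, cmt_indices: list):
--     valid_index = None
--     for b_i in reversed(range(len(port_declaration))):
--         valid_flag = True
--         for c_i in cmt_indices:
--             if c_i[0] <= b_i <= c_i[1]:
--                 valid_flag = False
--
--         if valid_flag and port_declaration[b_i].isalnum():
--             valid_index = b_i
--
--         if valid_index:
--             break
--
--     if valid_index is None:
--         raise ValueError("Port declaration either does not start or does not end?")
--
--     return valid_index
-- ===== SOURCE B (Python) =====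
-- def find_last_valid_index(port_declaration: str, cmt_indices: list):
--     n = len(port_declaration)
--     # coverage via a difference array: one pass over the intervals, one prefix-sum pass over the string
--     diff = [0] * (n + 1)
--     for c in cmt_indices:
--         lo = max(c[0], 0)
--         hi = min(c[1], n - 1)
--         if lo <= hi:
--             diff[lo] += 1
--             diff[hi + 1] -= 1
--     depth = 0
--     best = None
--     for i in range(n):
--         depth += diff[i]
--         if depth == 0 and port_declaration[i].isalnum():
--             best = i
--     if best is None:
--         raise ValueError("Port declaration either does not start or does not end?")
--     return best
-- ===== Notes on version B (the rewrite author's own statement) =====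
-- stated objective: alternative
-- what changed: B replaces A's backward scan that re-checks every comment interval at each position by a difference-array coverage pass over the intervals followed by a single forward prefix-sum pass that keeps the last uncovered alphanumeric index.
-- outside the precondition, e.g. on find_last_valid_index('99y', [[2, 1, 0], [7]]): A returns 2, B raises IndexError
import Mathlib
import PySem

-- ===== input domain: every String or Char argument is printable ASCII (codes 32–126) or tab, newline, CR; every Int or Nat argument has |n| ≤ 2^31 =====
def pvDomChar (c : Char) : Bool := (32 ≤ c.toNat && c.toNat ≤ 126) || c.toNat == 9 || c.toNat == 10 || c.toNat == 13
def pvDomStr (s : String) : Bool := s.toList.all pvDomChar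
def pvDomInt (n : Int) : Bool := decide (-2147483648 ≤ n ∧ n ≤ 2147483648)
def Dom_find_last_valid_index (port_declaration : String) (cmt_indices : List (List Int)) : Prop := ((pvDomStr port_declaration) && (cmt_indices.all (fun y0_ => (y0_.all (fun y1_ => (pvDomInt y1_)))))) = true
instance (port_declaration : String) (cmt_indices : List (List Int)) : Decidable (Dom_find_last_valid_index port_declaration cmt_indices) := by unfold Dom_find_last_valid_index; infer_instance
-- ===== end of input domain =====

-- B computes interval coverage once with a difference array and takes the last uncovered
-- alphanumeric position in a single forward prefix-sum pass (alternative algorithm;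
-- A instead rescans every interval at each position, backward with early exit).

-- `c[j]` for an inner interval list; Pre_ guarantees 2 ≤ c.length, so the `.getD 0`
-- default (where Python raises IndexError) is never taken on admitted inputs.
def pvG (c : List Int) (j : Int) : Int := (PySem.List.pyGet? c j).getD 0

-- ===== PORT A =====
-- inner `for c_i in cmt_indices: if c_i[0] <= b_i <= c_i[1]: valid_flag = False`
def pvAFlag (cmt : List (List Int)) (b : Int) : Bool :=
  cmt.foldl (fun f c => if pvG c 0 ≤ b ∧ b ≤ pvG c 1 then false else f) true

-- `for b_i in reversed(range(len(port_declaration)))` with the `if valid_index: break`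
def pvAGo (s : List Char) (cmt : List (List Int)) : Nat → Option Int → Option Int
  | 0, acc => acc
  | i+1, acc =>
      let b : Int := (i : Int)
      let acc' :=
        if pvAFlag cmt b && PySem.Chars.isalnum ((PySem.List.pyGet? s b).getD ' ')
        then some b else acc
      match acc' with
      | some v => if v ≠ 0 then some v else pvAGo s cmt i (some v)
      | none => pvAGo s cmt i none

def find_last_valid_index (port_declaration : String) (cmt_indices : List (List Int)) : Int :=
  -- `valid_index is None` → ValueError, excluded by Pre_
  (pvAGo port_declaration.toList cmt_indices port_declaration.toList.length none).getD 0

-- ===== PORT B =====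
-- one interval of Source B's first loop: clamp, then mark the two ends in the difference array
def pvBDiffStep (n : Nat) (d : List Int) (c : List Int) : List Int :=
  let lo := max (pvG c 0) 0
  let hi := min (pvG c 1) ((n : Int) - 1)
  if lo ≤ hi then
    let d1 := d.set lo.toNat ((d.getD lo.toNat 0) + 1)
    d1.set (hi + 1).toNat ((d1.getD (hi + 1).toNat 0) - 1)
  else d

def find_last_valid_index_alt (port_declaration : String) (cmt_indices : List (List Int)) : Int :=
  let s := port_declaration.toList
  let n := s.length
  let diff := cmt_indices.foldl (pvBDiffStep n) (List.replicate (n+1) 0)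
  let r := (List.range n).foldl
    (fun (st : Int × Option Int) i =>
      let depth := st.1 + diff.getD i 0
      if depth = 0 && PySem.Chars.isalnum (s.getD i ' ')
      then (depth, some (i : Int)) else (depth, st.2))
    (0, none)
  -- `best is None` → ValueError, excluded by Pre_
  r.2.getD 0

-- ===== PRECONDITION & SPEC =====
-- Pre_ excludes inputs with an inner interval list of fewer than two entries (A's chained
-- comparison may short-circuit past the missing c[1] and still return, while B always reads
-- both ends and raises IndexError) and inputs with no alphanumeric position outside every
-- interval, on which A raises ValueError.
def Pre_find_last_valid_index (port_declaration : String) (cmt_indices : List (List Int)) : Prop :=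
  (∀ c ∈ cmt_indices, 2 ≤ c.length) ∧
  (∃ i ∈ List.range port_declaration.toList.length,
     PySem.Chars.isalnum (port_declaration.toList.getD i ' ') = true ∧
     ∀ c ∈ cmt_indices, ¬ (pvG c 0 ≤ (i : Int) ∧ (i : Int) ≤ pvG c 1))
instance (port_declaration : String) (cmt_indices : List (List Int)) : Decidable (Pre_find_last_valid_index port_declaration cmt_indices) := by unfold Pre_find_last_valid_index; infer_instance

def pvWitness_find_last_valid_index : String × List (List Int) := ("x = 1", [[1, 2]])

def Spec_find_last_valid_index (port_declaration : String) (cmt_indices : List (List Int)) (out : Int) : Prop := out = find_last_valid_index_alt port_declaration cmt_indices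
instance (port_declaration : String) (cmt_indices : List (List Int)) (out : Int) : Decidable (Spec_find_last_valid_index port_declaration cmt_indices out) := by unfold Spec_find_last_valid_index; infer_instance

-- ===== CLAIM (what is proved, stated in full; the proofs are below) =====
def Claim_equal_find_last_valid_index : Prop := ∀ (port_declaration : String) (cmt_indices : List (List Int)), Dom_find_last_valid_index port_declaration cmt_indices → Pre_find_last_valid_index port_declaration cmt_indices → Spec_find_last_valid_index port_declaration cmt_indices (find_last_valid_index port_declaration cmt_indices)

-- ===== LEMMAS AND PROOFS =====

-- `b` lies in some comment interval
def pvCov (cmt : List (List Int)) (b : Int) : Bool :=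
  cmt.any (fun c => decide (pvG c 0 ≤ b ∧ b ≤ pvG c 1))

-- position i is valid: uncovered and alphanumeric
def pvP (s : List Char) (cmt : List (List Int)) (i : Nat) : Bool :=
  !pvCov cmt (i : Int) && PySem.Chars.isalnum (s.getD i ' ')

-- highest valid position below m, the common characterisation of both ports
def pvLast (s : List Char) (cmt : List (List Int)) : Nat → Option Int
  | 0 => none
  | m+1 => if pvP s cmt m then some (m : Int) else pvLast s cmt m

-- number of intervals covering b
def pvCnt (cmt : List (List Int)) (b : Int) : Int :=
  ((cmt.filter (fun c => decide (pvG c 0 ≤ b ∧ b ≤ pvG c 1))).length : Int)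

-- ---- A side ----

theorem pvAFlag_aux (b : Int) : ∀ (cmt : List (List Int)) (acc : Bool),
    cmt.foldl (fun f c => if pvG c 0 ≤ b ∧ b ≤ pvG c 1 then false else f) acc
      = (acc && !pvCov cmt b)
  | [], acc => by simp [pvCov]
  | c :: cs, acc => by
      simp only [List.foldl_cons, pvAFlag_aux b cs, pvCov, List.any_cons]
      by_cases hc : pvG c 0 ≤ b ∧ b ≤ pvG c 1 <;> simp [hc]

theorem pvAFlag_eq (cmt : List (List Int)) (b : Int) :
    pvAFlag cmt b = !pvCov cmt b := by
  rw [pvAFlag, pvAFlag_aux]; simp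

theorem pvAGo_succ (s : List Char) (cmt : List (List Int)) (i : Nat) :
    pvAGo s cmt (i+1) none
      = if pvP s cmt i then some (i : Int) else pvAGo s cmt i none := by
  have hc : (pvAFlag cmt (i : Int)
      && PySem.Chars.isalnum ((PySem.List.pyGet? s (i : Int)).getD ' ')) = pvP s cmt i := by
    simp [pvAFlag_eq, pvP, List.getD_eq_getElem?_getD]
  simp only [pvAGo, hc]
  by_cases hp : pvP s cmt i = true
  · cases i with
    | zero => simp [hp, pvAGo]
    | succ n => simp [hp, show ((n : Int) + 1) ≠ 0 by omega]
  · simp [hp]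

theorem pvAGo_eq_last (s : List Char) (cmt : List (List Int)) (m : Nat) :
    pvAGo s cmt m none = pvLast s cmt m := by
  induction m with
  | zero => rfl
  | succ m ih => rw [pvAGo_succ, pvLast, ih]

-- ---- B side ----

theorem pv_sum_set (l : List Int) (k : Nat) (v : Int) :
    (l.set k v).sum = l.sum + (if k < l.length then v - l.getD k 0 else 0) := by
  induction l generalizing k with
  | nil => simp
  | cons x xs ih =>
      cases k with
      | zero => simp [List.getD]; ring
      | succ k =>
          simp [List.set_cons_succ, ih k]
          split_ifs <;> omega

theorem pv_take_sum_succ (d : List Int) (i : Nat) :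
    (d.take (i+1)).sum = (d.take i).sum + d.getD i 0 := by
  rw [List.take_add_one]
  by_cases hlt : i < d.length
  · have h : d[i]? = some d[i] := List.getElem?_eq_getElem hlt
    simp [h, hlt, List.getD_eq_getElem?_getD]
  · have h : d[i]? = none := List.getElem?_eq_none_iff.mpr (by omega)
    simp [h, List.getD_eq_getElem?_getD]

theorem pvPS_set (d : List Int) (k : Nat) (v : Int) (i : Nat) (hk : k < d.length) :
    ((d.set k v).take (i+1)).sum
      = (d.take (i+1)).sum + (if k ≤ i then v - d.getD k 0 else 0) := by
  rw [List.take_set, pv_sum_set]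
  have hlen : (d.take (i+1)).length = min (i+1) d.length := List.length_take
  by_cases hki : k ≤ i
  · have h1 : k < (d.take (i+1)).length := by omega
    have h2 : (d.take (i+1)).getD k 0 = d.getD k 0 := by
      simp [List.getD_eq_getElem?_getD, Nat.lt_succ_of_le hki]
    simp [h2, hki]
    exact fun hn => absurd hk (by omega)
  · have h1 : ¬ k < (d.take (i+1)).length := by omega
    simp [h1, hki]

theorem pvBDiffStep_length (n : Nat) (d : List Int) (c : List Int) :
    (pvBDiffStep n d c).length = d.length := by
  simp only [pvBDiffStep]
  split <;> simp

theorem pvBDiffStep_PS (n : Nat) (d : List Int) (c : List Int) (i : Nat)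
    (hd : d.length = n + 1) (hi : i < n) :
    ((pvBDiffStep n d c).take (i+1)).sum
      = (d.take (i+1)).sum + (if pvG c 0 ≤ (i:Int) ∧ (i:Int) ≤ pvG c 1 then 1 else 0) := by
  simp only [pvBDiffStep]
  by_cases hlh : max (pvG c 0) 0 ≤ min (pvG c 1) ((n : Int) - 1)
  · rw [if_pos hlh]
    set lo : Int := max (pvG c 0) 0 with hlo
    set hi : Int := min (pvG c 1) ((n : Int) - 1) with hhi
    have hlo0 : 0 ≤ lo := le_max_right _ _
    have hhin : hi ≤ (n : Int) - 1 := min_le_right _ _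
    have hkl : lo.toNat < d.length := by omega
    have hkh : (hi + 1).toNat < d.length := by omega
    have hne : lo.toNat ≠ (hi + 1).toNat := by omega
    rw [pvPS_set _ _ _ _ (by simp [List.length_set]; omega)]
    rw [pvPS_set _ _ _ _ hkl]
    have hg : (d.set lo.toNat (d.getD lo.toNat 0 + 1)).getD (hi + 1).toNat 0
        = d.getD (hi + 1).toNat 0 := by
      simp [List.getD_eq_getElem?_getD, List.getElem?_set_ne hne]
    rw [hg]
    have e1 : (lo.toNat ≤ i) = (pvG c 0 ≤ (i : Int)) := by
      simp only [eq_iff_iff]; omega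
    have e2 : ((hi + 1).toNat ≤ i) = ¬ ((i : Int) ≤ pvG c 1) := by
      simp only [eq_iff_iff]; omega
    simp only [e1, e2]
    split_ifs <;> omega
  · rw [if_neg hlh]
    have : ¬ (pvG c 0 ≤ (i : Int) ∧ (i : Int) ≤ pvG c 1) := by omega
    simp [this]

theorem pvBDiff_PS (n : Nat) (cmt : List (List Int)) (d : List Int) (i : Nat)
    (hd : d.length = n + 1) (hi : i < n) :
    ((cmt.foldl (pvBDiffStep n) d).take (i+1)).sum
      = (d.take (i+1)).sum + pvCnt cmt (i : Int) := by
  induction cmt generalizing d with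
  | nil => simp [pvCnt]
  | cons c cs ih =>
      rw [List.foldl_cons,
        ih (pvBDiffStep n d c) (by rw [pvBDiffStep_length]; exact hd),
        pvBDiffStep_PS n d c i hd hi]
      simp only [pvCnt, List.filter_cons]
      by_cases hcd : pvG c 0 ≤ (i : Int) ∧ (i : Int) ≤ pvG c 1
      · rw [if_pos hcd, if_pos (show decide (pvG c 0 ≤ (i : Int) ∧ (i : Int) ≤ pvG c 1) = true by simpa using hcd)]
        simp only [List.length_cons]; push_cast; ring
      · rw [if_neg hcd, if_neg (show ¬ decide (pvG c 0 ≤ (i : Int) ∧ (i : Int) ≤ pvG c 1) = true by simpa using hcd)]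
        ring

theorem pvCnt_zero_iff (cmt : List (List Int)) (b : Int) :
    pvCnt cmt b = 0 ↔ pvCov cmt b = false := by
  simp [pvCnt, pvCov, List.length_eq_zero_iff, List.filter_eq_nil_iff, List.any_eq_false]

theorem pvBScan_eq (s : List Char) (cmt : List (List Int)) (diff : List Int)
    (h : ∀ i, i < s.length → (diff.take (i+1)).sum = pvCnt cmt (i : Int)) :
    ∀ m, m ≤ s.length →
      ((List.range m).foldl
        (fun (st : Int × Option Int) i =>
          let depth := st.1 + diff.getD i 0
          if depth = 0 && PySem.Chars.isalnum (s.getD i ' ')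
          then (depth, some (i : Int)) else (depth, st.2))
        (0, none))
      = ((diff.take m).sum, pvLast s cmt m) := by
  intro m
  induction m with
  | zero => intro _; simp [pvLast]
  | succ m ih =>
      intro hm
      rw [List.range_succ, List.foldl_append, ih (by omega),
        List.foldl_cons, List.foldl_nil]
      have hdep : (diff.take m).sum + diff.getD m 0 = pvCnt cmt (m : Int) := by
        rw [← pv_take_sum_succ]; exact h m (by omega)
      have hcond : (decide ((diff.take m).sum + diff.getD m 0 = 0)
          && PySem.Chars.isalnum (s.getD m ' ')) = pvP s cmt m := by
        rw [hdep, pvP]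
        rcases hcv : pvCov cmt (m : Int) with _ | _
        · simp [(pvCnt_zero_iff cmt (m : Int)).mpr hcv]
        · have : ¬ pvCnt cmt (m : Int) = 0 := fun h0 => by
            rw [(pvCnt_zero_iff cmt (m : Int)).mp h0] at hcv; cases hcv
          simp [this]
      rw [pv_take_sum_succ, pvLast]
      simp only [hcond]
      by_cases hp : pvP s cmt m = true <;> simp [hp]

-- ===== VERDICT (by name: the statement is the Claim_ definition above) =====
theorem find_last_valid_index_spec : Claim_equal_find_last_valid_index := by
  intro p cmt _hdom _hpre
  unfold Spec_find_last_valid_index find_last_valid_index find_last_valid_index_alt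
  have hps : ∀ i, i < p.toList.length →
      (((cmt.foldl (pvBDiffStep p.toList.length)
          (List.replicate (p.toList.length + 1) 0)).take (i+1)).sum = pvCnt cmt (i : Int)) := by
    intro i hi
    rw [pvBDiff_PS p.toList.length cmt _ i (by simp) hi]
    simp [List.take_replicate]
  dsimp only
  rw [pvAGo_eq_last, pvBScan_eq p.toList cmt _ hps p.toList.length le_rfl]
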